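-- pv_equiv track=rewrite | github.com/aisi-iman/compute-spend-analysis | setup_multi_account.py | sanitize_profile_name
-- ===== SOURCE A (Python) =====
-- def sanitize_profile_name(account_name: str, account_id: str) -> str:
--     """Create a valid AWS profile name from account name."""
--     # Remove special characters, convert spaces to hyphens
--     safe_name = "".join(c if c.isalnum() or c in "-_" else "-" for c in account_name.lower())
--     # Remove consecutive hyphens
--     while "--" in safe_name:
--         safe_name = safe_name.replace("--", "-")
--     # Trim and ensure not empty
--     safe_name = safe_name.strip("-")
--     if not safe_name:
--         safe_name = f"account-{account_id[-4:]}"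
--     return f"aisi-{safe_name}"
-- ===== SOURCE B (Python) =====
-- def sanitize_profile_name(account_name: str, account_id: str) -> str:
--     """Create a valid AWS profile name from account name."""
--     # One pass: collect maximal runs of kept characters, join with single hyphens.
--     tokens = []
--     cur = ""
--     for c in account_name.lower():
--         if c.isalnum() or c == "_":
--             cur += c
--         elif cur:
--             tokens.append(cur)
--             cur = ""
--     if cur:
--         tokens.append(cur)
--     safe_name = "-".join(tokens)
--     if not safe_name:
--         safe_name = f"account-{account_id[-4:]}"
--     return f"aisi-{safe_name}"
-- ===== Notes on version B (the rewrite author's own statement) =====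
-- stated objective: alternative
-- what changed: B replaces A's character-substitution pass plus the repeated replace('--','-') collapse loop and strip('-') by a single left-to-right scan that collects maximal runs of kept characters (alnum or '_') as tokens and joins them with single hyphens.
import Mathlib
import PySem

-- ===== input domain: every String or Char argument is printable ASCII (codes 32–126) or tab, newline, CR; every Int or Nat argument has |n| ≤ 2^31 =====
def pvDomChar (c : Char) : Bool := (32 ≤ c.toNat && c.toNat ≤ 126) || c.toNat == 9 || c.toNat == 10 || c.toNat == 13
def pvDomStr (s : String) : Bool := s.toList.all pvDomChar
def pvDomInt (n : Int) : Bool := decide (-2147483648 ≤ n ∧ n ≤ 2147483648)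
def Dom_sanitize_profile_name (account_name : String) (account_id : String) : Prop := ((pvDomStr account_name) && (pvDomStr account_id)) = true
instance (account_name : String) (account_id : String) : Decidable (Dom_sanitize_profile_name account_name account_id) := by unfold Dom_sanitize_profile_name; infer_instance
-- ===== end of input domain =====

-- B replaces A's replace-pass + '--'-collapse loop + strip('-') by one left-to-right
-- tokenising pass joined with single hyphens (objective: alternative single-pass algorithm).

-- ===== PORT A =====
-- helper spec of one pass of s.replace("--", "-"), needed to prove the while-loop terminates
def pvOnepass : List Char → List Char
  | [] => []
  | [c] => [c]
  | a :: b :: t => if a = '-' ∧ b = '-' then '-' :: pvOnepass t else a :: pvOnepass (b :: t)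

theorem pvReplaceGo_eq (fuel : Nat) (s acc : List Char) (h : s.length ≤ fuel) :
    PySem.Chars.replace.go ['-', '-'] ['-'] fuel s acc = acc.reverse ++ pvOnepass s := by
  induction fuel generalizing s acc with
  | zero =>
    interval_cases hs : s.length
    rw [List.length_eq_zero_iff] at hs
    subst hs
    simp [PySem.Chars.replace.go, pvOnepass]
  | succ n ih =>
    match s with
    | [] => simp [PySem.Chars.replace.go, pvOnepass]
    | [c] =>
      simp [PySem.Chars.replace.go, List.isPrefixOf, pvOnepass,
        ih [] (c :: acc) (by simp)]
    | a :: b :: t =>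
      simp only [List.length_cons, Nat.succ_le_succ_iff] at h
      by_cases hab : a = '-' ∧ b = '-'
      · obtain ⟨ha, hb⟩ := hab; subst ha; subst hb
        rw [show PySem.Chars.replace.go ['-','-'] ['-'] (n+1) ('-'::'-'::t) acc
              = PySem.Chars.replace.go ['-','-'] ['-'] n t ('-'::acc) by
            simp [PySem.Chars.replace.go, List.isPrefixOf]]
        rw [ih t ('-'::acc) (by omega)]
        simp [pvOnepass]
      · rw [show PySem.Chars.replace.go ['-','-'] ['-'] (n+1) (a::b::t) acc
              = PySem.Chars.replace.go ['-','-'] ['-'] n (b::t) (a::acc) by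
            simp only [PySem.Chars.replace.go]
            have : List.isPrefixOf ['-','-'] (a::b::t) = false := by
              simp [List.isPrefixOf]
              intro ha hb; exact hab ⟨ha.symm, hb.symm⟩
            simp [this]]
        rw [ih (b::t) (a::acc) (by simp; omega)]
        simp [pvOnepass, hab]

theorem pvReplace_dd (s : List Char) :
    PySem.Chars.replace s ['-', '-'] ['-'] = pvOnepass s := by
  rw [show PySem.Chars.replace s ['-','-'] ['-']
      = PySem.Chars.replace.go ['-','-'] ['-'] s.length s [] by
    simp [PySem.Chars.replace]]
  simpa using pvReplaceGo_eq s.length s [] le_rfl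

theorem pvOnepass_length_le (s : List Char) : (pvOnepass s).length ≤ s.length := by
  fun_induction pvOnepass with
  | case1 => simp [pvOnepass]
  | case2 c => simp [pvOnepass]
  | case3 a b t hab ih => simp [pvOnepass, hab]; omega
  | case4 a b t hab ih =>
    have := ih; simp [pvOnepass, hab, List.length_cons] at this ⊢; omega

theorem pvOnepass_length_lt (s : List Char) (h : ['-', '-'] <:+: s) :
    (pvOnepass s).length < s.length := by
  induction s using pvOnepass.induct with
  | case1 => simp at h
  | case2 c =>
    exfalso
    have := List.IsInfix.length_le h
    simp at this
  | case3 a b t hab ih =>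
    obtain ⟨ha, hb⟩ := hab; subst ha; subst hb
    have := pvOnepass_length_le t
    simp [pvOnepass]
    omega
  | case4 a b t hab ih =>
    have h' : ['-','-'] <:+: (b :: t) := by
      rcases (List.infix_cons_iff).1 h with hpre | hinf
      · exfalso
        rcases hpre with ⟨u, hu⟩
        simp at hu
        exact hab ⟨hu.1.symm, hu.2.1.symm⟩
      · exact hinf
    have := ih h'
    simp [pvOnepass, hab, List.length_cons] at this ⊢
    omega

theorem pvReplace_dd_length_lt (s : List Char)
    (h : PySem.Chars.isIn ['-', '-'] s = true) :
    (PySem.Chars.replace s ['-', '-'] ['-']).length < s.length := by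
  rw [pvReplace_dd]
  exact pvOnepass_length_lt s ((PySem.Chars.isIn_iff_infix _ _).1 h)

-- the while "--" in safe_name loop of A
def pvCollapse (s : List Char) : List Char :=
  if h : PySem.Chars.isIn ['-', '-'] s = true then
    pvCollapse (PySem.Chars.replace s ['-', '-'] ['-'])
  else s
termination_by s.length
decreasing_by exact pvReplace_dd_length_lt s h

def sanitize_profile_name (account_name : String) (account_id : String) : String :=
  let safe0 := (PySem.Chars.lower account_name.toList).map
    (fun c => if PySem.Chars.isalnum c || c = '-' || c = '_' then c else '-')
  let safe1 := pvCollapse safe0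
  let safe2 := PySem.Chars.stripChars safe1 ['-']
  let safe3 := if safe2 = [] then
      "account-".toList ++ PySem.Chars.slice account_id.toList (some (-4)) none
    else safe2
  String.ofList ("aisi-".toList ++ safe3)

-- ===== PORT B =====
def pvP (c : Char) : Bool := PySem.Chars.isalnum c || c = '_'

-- the body of B's for-loop: state = (tokens built so far, current run)
def pvStep (st : List (List Char) × List Char) (c : Char) : List (List Char) × List Char :=
  if pvP c then (st.1, st.2 ++ [c])
  else if st.2 = [] then st
  else (st.1 ++ [st.2], [])

def sanitize_profile_name_alt (account_name : String) (account_id : String) : String :=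
  let r := (PySem.Chars.lower account_name.toList).foldl pvStep ([], [])
  let toks := if r.2 = [] then r.1 else r.1 ++ [r.2]
  let safe := PySem.Chars.join ['-'] toks
  let safe := if safe = [] then
      "account-".toList ++ PySem.Chars.slice account_id.toList (some (-4)) none
    else safe
  String.ofList ("aisi-".toList ++ safe)

-- ===== PRECONDITION & SPEC =====
def Spec_sanitize_profile_name (account_name : String) (account_id : String) (out : String) : Prop := out = sanitize_profile_name_alt account_name account_id
instance (account_name : String) (account_id : String) (out : String) : Decidable (Spec_sanitize_profile_name account_name account_id out) := by unfold Spec_sanitize_profile_name; infer_instance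

-- ===== CLAIM (what is proved, stated in full; the proofs are below) =====
def Claim_equal_sanitize_profile_name : Prop := ∀ (account_name : String) (account_id : String), Dom_sanitize_profile_name account_name account_id → Spec_sanitize_profile_name account_name account_id (sanitize_profile_name account_name account_id)

-- ===== LEMMAS AND PROOFS =====

-- collapse each maximal run of '-' to a single '-': the fixpoint of the while loop
def pvSqueeze : List Char → List Char
  | [] => []
  | [c] => [c]
  | a :: b :: t => if a = '-' ∧ b = '-' then pvSqueeze (b :: t) else a :: pvSqueeze (b :: t)

def pvG (c : Char) : Char := if pvP c then c else '-'

def pvSegs (L : List Char) : List (List Char) := L.splitOnP (fun c => !pvP c)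

def pvToks (L : List Char) : List (List Char) := (pvSegs L).filter (· ≠ [])

def pvJoin : List (List Char) → List Char
  | [] => []
  | [x] => x
  | x :: y :: r => x ++ '-' :: pvJoin (y :: r)

def pvTokensFrom (cur : List Char) : List Char → List (List Char)
  | [] => if cur = [] then [] else [cur]
  | c :: t =>
    if pvP c then pvTokensFrom (cur ++ [c]) t
    else (if cur = [] then [] else [cur]) ++ pvTokensFrom [] t

def pvHeadP (L : List Char) : Bool := match L with
  | [] => false
  | c :: _ => pvP c

def pvLstrip (x : List Char) : List Char := x.dropWhile (· = '-')
def pvRstrip (x : List Char) : List Char := (x.reverse.dropWhile (· = '-')).reverse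

theorem pvStripChars_eq (x : List Char) :
    PySem.Chars.stripChars x ['-'] = pvRstrip (pvLstrip x) := by
  have hP : (fun c => List.contains ['-'] c) = (fun c : Char => decide (c = '-')) := by
    funext c; by_cases h : c = '-' <;> simp [h, List.contains_cons]
  simp only [PySem.Chars.stripChars, pvRstrip, pvLstrip, hP]

theorem pvP_ne_dash (c : Char) (h : pvP c = true) : c ≠ '-' := by
  rintro rfl; revert h; decide

theorem pvSqueeze_cons (c : Char) (x : List Char) :
    pvSqueeze (c :: x) =
      if c = '-' ∧ x.head? = some '-' then pvSqueeze x else c :: pvSqueeze x := by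
  cases x with
  | nil => simp [pvSqueeze]
  | cons b t => by_cases h : c = '-' ∧ b = '-' <;> simp [pvSqueeze, h]

theorem pvOnepass_head? (s : List Char) : (pvOnepass s).head? = s.head? := by
  fun_induction pvOnepass with
  | case1 => rfl
  | case2 c => rfl
  | case3 a b t hab ih => obtain ⟨ha, hb⟩ := hab; subst ha; subst hb; rfl
  | case4 a b t hab ih => rfl

theorem pvSqueeze_onepass (s : List Char) : pvSqueeze (pvOnepass s) = pvSqueeze s := by
  fun_induction pvOnepass with
  | case1 => rfl
  | case2 c => rfl
  | case3 a b t hab ih =>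
    obtain ⟨ha, hb⟩ := hab; subst ha; subst hb
    rw [pvSqueeze_cons, pvOnepass_head?, ih]
    by_cases ht : t.head? = some '-' <;> simp [pvSqueeze_cons, ht]
  | case4 a b t hab ih =>
    rw [pvSqueeze_cons, pvOnepass_head?, ih]
    simp [pvSqueeze, hab]

theorem pvSqueeze_of_no_dd (s : List Char) (h : ¬ ['-', '-'] <:+: s) : pvSqueeze s = s := by
  fun_induction pvSqueeze with
  | case1 => rfl
  | case2 c => rfl
  | case3 a b t hab ih =>
    exfalso
    obtain ⟨ha, hb⟩ := hab; subst ha; subst hb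
    exact h ⟨[], t, rfl⟩
  | case4 a b t hab ih =>
    have h' : ¬ ['-', '-'] <:+: (b :: t) := fun hi => h (List.infix_cons_iff.2 (Or.inr hi))
    rw [ih h']

theorem pvCollapse_eq_squeeze (s : List Char) : pvCollapse s = pvSqueeze s := by
  fun_induction pvCollapse with
  | case1 s h ih =>
    rw [ih, pvReplace_dd, pvSqueeze_onepass]
  | case2 s h =>
    have : ¬ ['-', '-'] <:+: s := by
      rw [← PySem.Chars.isIn_eq_false_iff]
      simpa using h
    rw [pvSqueeze_of_no_dd s this]

theorem pvMap_port_eq_mapG (L : List Char) :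
    L.map (fun c => if PySem.Chars.isalnum c || c = '-' || c = '_' then c else '-') = L.map pvG := by
  simp only [List.map_inj_left]
  intro c _
  cases hal : PySem.Chars.isalnum c <;> by_cases hu : c = '_' <;> by_cases hd : c = '-' <;>
    simp_all [pvG, pvP] <;> simp_all

theorem pvLstrip_dash (y : List Char) : pvLstrip ('-' :: y) = pvLstrip y := by
  simp [pvLstrip, List.dropWhile]

theorem pvLstrip_stop (c : Char) (y : List Char) (h : ¬ c = '-') : pvLstrip (c :: y) = c :: y := by
  simp [pvLstrip, List.dropWhile, h]

theorem pvLstrip_squeeze (M : List Char) :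
    pvLstrip (pvSqueeze M) = pvSqueeze (pvLstrip M) := by
  fun_induction pvSqueeze with
  | case1 => rfl
  | case2 c => by_cases h : c = '-' <;> simp [pvLstrip, pvSqueeze, List.dropWhile, h]
  | case3 a b t hab ih =>
    obtain ⟨ha, hb⟩ := hab; subst ha; subst hb
    rw [ih]
    simp only [pvLstrip_dash]
  | case4 a b t hab ih =>
    by_cases ha : a = '-'
    · subst ha
      have hb : ¬ b = '-' := fun hb => hab ⟨rfl, hb⟩
      rw [pvLstrip_dash, ih, pvLstrip_dash]
    · rw [pvLstrip_stop a _ ha, pvLstrip_stop a _ ha]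
      simp [pvSqueeze, hab]

theorem pvLstrip_mapG (L : List Char) :
    pvLstrip (L.map pvG) = (L.dropWhile (fun c => !pvP c)).map pvG := by
  induction L with
  | nil => rfl
  | cons c t ih =>
    by_cases hp : pvP c
    · have hc : ¬ pvG c = '-' := by
        simp [pvG, hp]; exact pvP_ne_dash c hp
      simp [pvLstrip, pvG, List.dropWhile, hp, hc] at ih ⊢
      simp [pvP_ne_dash c hp]
    · have hc : pvG c = '-' := by simp [pvG, hp]
      simp only [List.map_cons, pvLstrip, List.dropWhile, hc, List.dropWhile_cons] at ih ⊢
      simp [hp]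
      exact ih

theorem pvRstrip_cons (c : Char) (x : List Char) :
    pvRstrip (c :: x) =
      if pvRstrip x = [] then (if c = '-' then [] else [c]) else c :: pvRstrip x := by
  simp only [pvRstrip, List.reverse_cons, List.dropWhile_append]
  by_cases h : (List.dropWhile (fun c => decide (c = '-')) x.reverse) = []
  · rw [if_pos (by simp [h, List.isEmpty_iff]), if_pos (by simp [h])]
    by_cases hc : c = '-' <;> simp [List.dropWhile, hc]
  · rw [if_neg (by simp [h, List.isEmpty_iff]), if_neg (by simp [h])]
    simp [List.reverse_append]

theorem pvSegs_ne_nil (L : List Char) : pvSegs L ≠ [] := List.splitOnP_ne_nil _ _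

theorem pvSegs_head_empty_iff (L : List Char) (s0 : List Char) (ss : List (List Char))
    (h : pvSegs L = s0 :: ss) : (s0 = []) ↔ pvHeadP L = false := by
  cases L with
  | nil =>
    simp only [pvSegs, List.splitOnP_nil] at h
    obtain ⟨rfl, rfl⟩ := by simpa using h
    simp [pvHeadP]
  | cons c t =>
    by_cases hp : pvP c
    · obtain ⟨u, us, hu⟩ := List.exists_cons_of_ne_nil (pvSegs_ne_nil t)
      have h' : pvSegs (c :: t) = (c :: u) :: us := by
        have h2 : pvSegs (c :: t) = (pvSegs t).modifyHead (List.cons c) := by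
          simp [pvSegs, List.splitOnP_cons, hp]
        rw [h2, hu, List.modifyHead_cons]
      rw [h'] at h
      obtain ⟨rfl, rfl⟩ := by simpa using h
      simp [pvHeadP, hp]
    · have h' : pvSegs (c :: t) = [] :: pvSegs t := by
        simp [pvSegs, List.splitOnP_cons, hp]
      rw [h'] at h
      obtain ⟨rfl, rfl⟩ := by simpa using h
      simp [pvHeadP, hp]

theorem pvToks_dropWhile (L : List Char) :
    pvToks (L.dropWhile (fun c => !pvP c)) = pvToks L := by
  induction L with
  | nil => rfl
  | cons c t ih =>
    by_cases hp : pvP c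
    · simp [List.dropWhile_cons, hp]
    · have h' : pvSegs (c :: t) = [] :: pvSegs t := by
        simp [pvSegs, List.splitOnP_cons, hp]
      simp only [List.dropWhile_cons, hp]
      simp only [Bool.not_false, if_pos]
      rw [ih]
      simp [pvToks, h']

theorem pvJoin_cons (x : List Char) (r : List (List Char)) :
    pvJoin (x :: r) = x ++ (if r = [] then [] else '-' :: pvJoin r) := by
  cases r <;> simp [pvJoin]

theorem pvJoin_cons_head (c : Char) (s : List Char) (r : List (List Char)) :
    pvJoin ((c :: s) :: r) = c :: pvJoin (s :: r) := by
  cases r <;> simp [pvJoin]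

theorem pvJoin_toks_ne_nil (L : List Char) (h : pvToks L ≠ []) : pvJoin (pvToks L) ≠ [] := by
  obtain ⟨x, xs, hx⟩ := List.exists_cons_of_ne_nil h
  have hxne : x ≠ [] := by
    have hmem : x ∈ pvToks L := by rw [hx]; exact List.mem_cons_self
    have := List.of_mem_filter hmem
    simpa using this
  rw [hx, pvJoin_cons]
  cases xs <;> simp_all

theorem pvRstrip_main (L : List Char) :
    pvRstrip (pvSqueeze (L.map pvG)) =
      (if pvToks L ≠ [] ∧ pvHeadP L = false then ['-'] else []) ++ pvJoin (pvToks L) := by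
  induction L with
  | nil => simp [pvSqueeze, pvRstrip, pvToks, pvSegs, List.splitOnP_nil, pvJoin]
  | cons c t ih =>
    obtain ⟨s0, ss, hseg⟩ := List.exists_cons_of_ne_nil (pvSegs_ne_nil t)
    by_cases hp : pvP c
    · have hcd : ¬ c = '-' := pvP_ne_dash c hp
      have hG : pvG c = c := by simp [pvG, hp]
      have hSx : pvSqueeze ((c :: t).map pvG) = c :: pvSqueeze (t.map pvG) := by
        rw [List.map_cons, hG, pvSqueeze_cons]
        simp [hcd]
      have hsegc : pvSegs (c :: t) = (c :: s0) :: ss := by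
        have h2 : pvSegs (c :: t) = (pvSegs t).modifyHead (List.cons c) := by
          simp [pvSegs, List.splitOnP_cons, hp]
        rw [h2, hseg, List.modifyHead_cons]
      have htoks : pvToks (c :: t) = (c :: s0) :: ss.filter (· ≠ []) := by
        simp [pvToks, hsegc]
      have hheadc : pvHeadP (c :: t) = true := by simp [pvHeadP, hp]
      rw [hSx, pvRstrip_cons, ih]
      by_cases hs0 : s0 = []
      · have hhead : pvHeadP t = false := (pvSegs_head_empty_iff t s0 ss hseg).1 hs0
        have htokst : pvToks t = ss.filter (· ≠ []) := by
          simp [pvToks, hseg, hs0]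
        subst hs0
        by_cases hf : ss.filter (· ≠ []) = []
        · rw [htokst, hhead, htoks, hheadc, hf]
          simp [pvJoin, hcd]
        · rw [htokst, hhead, htoks, hheadc]
          have hpre : (if (ss.filter (· ≠ []) ≠ [] ∧ (false : Bool) = false)
              then (['-'] : List Char) else []) = ['-'] := if_pos ⟨hf, rfl⟩
          have hpreR : (if (([c] :: ss.filter (· ≠ []) ≠ []) ∧ (true : Bool) = false)
              then (['-'] : List Char) else []) = [] := if_neg (by simp)
          rw [hpre, hpreR, List.nil_append]
          rw [if_neg (by simp : ¬((['-'] ++ pvJoin (ss.filter (· ≠ []))) = ([] : List Char)))]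
          rw [pvJoin_cons, if_neg hf]
          simp
      · have hhead : pvHeadP t = true := by
          cases hh : pvHeadP t
          · exact absurd ((pvSegs_head_empty_iff t s0 ss hseg).2 hh) hs0
          · rfl
        have htokst : pvToks t = s0 :: ss.filter (· ≠ []) := by
          simp [pvToks, hseg, hs0]
        have hjne : pvJoin (s0 :: ss.filter (· ≠ [])) ≠ [] := by
          have := pvJoin_toks_ne_nil t (by rw [htokst]; simp)
          rwa [htokst] at this
        rw [htokst, hhead, htoks, hheadc]
        have hpre : (if ((s0 :: ss.filter (· ≠ []) ≠ []) ∧ (true : Bool) = false)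
            then (['-'] : List Char) else []) = [] := if_neg (by simp)
        have hpreR : (if (((c :: s0) :: ss.filter (· ≠ []) ≠ []) ∧ (true : Bool) = false)
            then (['-'] : List Char) else []) = [] := if_neg (by simp)
        rw [hpre, hpreR, List.nil_append, List.nil_append, if_neg hjne, pvJoin_cons_head]
    · have hG : pvG c = '-' := by simp [pvG, hp]
      have hsegc : pvSegs (c :: t) = [] :: pvSegs t := by
        simp [pvSegs, List.splitOnP_cons, hp]
      have htoks : pvToks (c :: t) = pvToks t := by
        simp [pvToks, hsegc]
      have hheadc : pvHeadP (c :: t) = false := by simp [pvHeadP, hp]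
      cases t with
      | nil =>
        have hmap : List.map pvG [c] = ['-'] := by simp [hG]
        have hrs : pvRstrip (pvSqueeze ['-']) = [] := by decide
        have htoksc : pvToks [c] = [] := by
          simp [pvToks, pvSegs, List.splitOnP_cons, List.splitOnP_nil, hp]
        rw [hmap, hrs, htoksc]
        simp [pvJoin]
      | cons d t' =>
        by_cases hd : pvP d
        · have hdd : ¬ d = '-' := pvP_ne_dash d hd
          have hGd : pvG d = d := by simp [pvG, hd]
          have hSx : pvSqueeze ((c :: d :: t').map pvG) = '-' :: pvSqueeze ((d :: t').map pvG) := by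
            rw [List.map_cons, hG, pvSqueeze_cons]
            simp [hGd, hdd]
          have hheadt : pvHeadP (d :: t') = true := by simp [pvHeadP, hd]
          have hs0ne : s0 ≠ [] := by
            intro h0
            rw [(pvSegs_head_empty_iff _ s0 ss hseg).1 h0] at hheadt
            exact Bool.false_ne_true hheadt
          have htokst : pvToks (d :: t') = s0 :: ss.filter (· ≠ []) := by
            simp [pvToks, hseg, hs0ne]
          have hjne : pvJoin (s0 :: ss.filter (· ≠ [])) ≠ [] := by
            have := pvJoin_toks_ne_nil (d :: t') (by rw [htokst]; simp)
            rwa [htokst] at this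
          rw [hSx, pvRstrip_cons, ih, htoks, hheadc, hheadt, htokst]
          have hpre : (if ((s0 :: ss.filter (· ≠ []) ≠ []) ∧ (true : Bool) = false)
              then (['-'] : List Char) else []) = [] := if_neg (by simp)
          have hpreR : (if ((s0 :: ss.filter (· ≠ []) ≠ []) ∧ (false : Bool) = false)
              then (['-'] : List Char) else []) = ['-'] := if_pos ⟨by simp, rfl⟩
          rw [hpre, hpreR, List.nil_append, if_neg hjne]
          simp
        · have hGd : pvG d = '-' := by simp [pvG, hd]
          have hSx : pvSqueeze ((c :: d :: t').map pvG) = pvSqueeze ((d :: t').map pvG) := by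
            rw [List.map_cons, hG, pvSqueeze_cons]
            simp [hGd]
          have hheadt : pvHeadP (d :: t') = false := by simp [pvHeadP, hd]
          rw [hSx, ih, htoks, hheadc, hheadt]

theorem pvDropWhile_headP (L : List Char) (d : Char) (t' : List Char)
    (h : L.dropWhile (fun c => !pvP c) = d :: t') : pvP d = true := by
  induction L with
  | nil => simp at h
  | cons c t ih =>
    by_cases hp : pvP c
    · rw [List.dropWhile_cons, if_neg (by simp [hp])] at h
      cases h
      exact hp
    · rw [List.dropWhile_cons, if_pos (by simp [hp])] at h
      exact ih h

theorem pvStrip_main (L : List Char) :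
    PySem.Chars.stripChars (pvSqueeze (L.map pvG)) ['-'] = pvJoin (pvToks L) := by
  rw [pvStripChars_eq, pvLstrip_squeeze, pvLstrip_mapG, pvRstrip_main]
  have htoks' : pvToks (L.dropWhile (fun c => !pvP c)) = pvToks L := pvToks_dropWhile L
  cases hL' : L.dropWhile (fun c => !pvP c) with
  | nil =>
    rw [hL'] at htoks'
    have : pvToks ([] : List Char) = [] := by simp [pvToks, pvSegs, List.splitOnP_nil]
    rw [this] at htoks'
    simp [hL', ← htoks', this, pvJoin]
  | cons d t' =>
    have hd : pvP d = true := pvDropWhile_headP L d t' hL' 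
    rw [hL'] at htoks'
    rw [← htoks']
    have : pvHeadP (d :: t') = true := by simp [pvHeadP, hd]
    simp [this]

theorem pvFold_eq (t : List Char) (tks : List (List Char)) (cur : List Char) :
    (if (t.foldl pvStep (tks, cur)).2 = [] then (t.foldl pvStep (tks, cur)).1
     else (t.foldl pvStep (tks, cur)).1 ++ [(t.foldl pvStep (tks, cur)).2]) =
    tks ++ pvTokensFrom cur t := by
  induction t generalizing tks cur with
  | nil =>
    simp only [List.foldl_nil, pvTokensFrom]
    by_cases hcur : cur = [] <;> simp [hcur]
  | cons c t ih =>
    simp only [List.foldl_cons]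
    by_cases hp : pvP c
    · rw [show pvStep (tks, cur) c = (tks, cur ++ [c]) by simp [pvStep, hp]]
      rw [ih]
      simp [pvTokensFrom, hp]
    · by_cases hcur : cur = []
      · rw [show pvStep (tks, cur) c = (tks, cur) by simp [pvStep, hp, hcur]]
        subst hcur
        rw [ih]
        simp [pvTokensFrom, hp]
      · rw [show pvStep (tks, cur) c = (tks ++ [cur], []) by simp [pvStep, hp, hcur]]
        rw [ih]
        simp [pvTokensFrom, hp, hcur]

theorem pvTokensFrom_eq (L : List Char) (cur : List Char) :
    pvTokensFrom cur L = ((pvSegs L).modifyHead (cur ++ ·)).filter (· ≠ []) := by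
  induction L generalizing cur with
  | nil =>
    simp only [pvTokensFrom, pvSegs, List.splitOnP_nil, List.modifyHead_cons]
    by_cases hcur : cur = [] <;> simp [hcur]
  | cons c t ih =>
    obtain ⟨s0, ss, hseg⟩ := List.exists_cons_of_ne_nil (pvSegs_ne_nil t)
    by_cases hp : pvP c
    · have hsegc : pvSegs (c :: t) = (c :: s0) :: ss := by
        have h2 : pvSegs (c :: t) = (pvSegs t).modifyHead (List.cons c) := by
          simp [pvSegs, List.splitOnP_cons, hp]
        rw [h2, hseg, List.modifyHead_cons]
      simp only [pvTokensFrom, hp, if_pos]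
      rw [ih (cur ++ [c]), hseg, hsegc]
      simp
    · have hsegc : pvSegs (c :: t) = [] :: pvSegs t := by
        simp [pvSegs, List.splitOnP_cons, hp]
      simp only [pvTokensFrom, hp, Bool.false_eq_true, if_false]
      rw [ih [], hsegc, List.modifyHead_cons]
      have hmod : (pvSegs t).modifyHead (fun x => [] ++ x) = pvSegs t := by
        cases (pvSegs t) <;> simp
      rw [hmod]
      by_cases hcur : cur = [] <;> simp [hcur]

theorem pvTokensFrom_nil_eq (L : List Char) : pvTokensFrom [] L = pvToks L := by
  rw [pvTokensFrom_eq]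
  have hmod : (pvSegs L).modifyHead (fun x => [] ++ x) = pvSegs L := by
    cases (pvSegs L) <;> simp
  rw [hmod]
  rfl

theorem pvJoin_eq_join (ts : List (List Char)) : PySem.Chars.join ['-'] ts = pvJoin ts := by
  fun_induction pvJoin with
  | case1 => simp [PySem.Chars.join, List.intercalate]
  | case2 x => simp [PySem.Chars.join, List.intercalate, List.intersperse]
  | case3 x y r ih =>
    simp [PySem.Chars.join, List.intercalate, List.intersperse] at ih ⊢
    simp [ih]

theorem sanitize_profile_name_spec : Claim_equal_sanitize_profile_name := by
  intro account_name account_id _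
  simp only [Spec_sanitize_profile_name, sanitize_profile_name, sanitize_profile_name_alt]
  rw [pvMap_port_eq_mapG, pvCollapse_eq_squeeze, pvStrip_main, pvFold_eq,
    pvTokensFrom_nil_eq, List.nil_append, pvJoin_eq_join]
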